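-- pv_equiv track=rewrite | github.com/snnn1/QTSW2 | tools/diagnose_cpu_spike.py | max_per_10ms_bucket
-- ===== SOURCE A (Python) =====
-- from typing import Any, Dict, Iterable, List, Optional, Tuple
--
-- def max_per_10ms_bucket(times_ms: List[int]) -> int:
--     if not times_ms:
--         return 0
--     times_ms.sort()
--     best = 0
--     j = 0
--     for i, t in enumerate(times_ms):
--         while j < len(times_ms) and times_ms[j] <= t + 10:
--             j += 1
--         best = max(best, j - i)
--     return best
-- ===== SOURCE B (Python) =====
-- import bisect
--
-- def max_per_10ms_bucket(times_ms):
--     times_ms.sort()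
--     best = 0
--     for i, t in enumerate(times_ms):
--         best = max(best, bisect.bisect_right(times_ms, t + 10) - i)
--     return best
-- ===== Notes on version B (the rewrite author's own statement) =====
-- stated objective: alternative
-- what changed: Replaces the monotone two-pointer sliding-window scan with a per-element binary search (bisect_right) for the end of each inclusive [t, t+10] window, dropping the explicit empty-list guard and the carried j pointer.
import Mathlib
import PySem

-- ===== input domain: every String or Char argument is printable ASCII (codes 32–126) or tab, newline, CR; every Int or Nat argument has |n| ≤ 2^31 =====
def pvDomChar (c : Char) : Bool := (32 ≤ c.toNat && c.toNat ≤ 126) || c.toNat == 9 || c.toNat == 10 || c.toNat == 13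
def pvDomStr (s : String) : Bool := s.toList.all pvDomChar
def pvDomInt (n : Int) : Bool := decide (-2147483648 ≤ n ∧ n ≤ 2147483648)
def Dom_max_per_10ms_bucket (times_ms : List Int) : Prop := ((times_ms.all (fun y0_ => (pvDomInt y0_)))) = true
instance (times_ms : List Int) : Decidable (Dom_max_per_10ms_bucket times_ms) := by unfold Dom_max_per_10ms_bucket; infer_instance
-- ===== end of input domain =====

-- B replaces A's two-pointer sliding scan with a per-element bisect_right binary search
-- (alternative decomposition, same cost class); both Pythons sort times_ms in place —
-- the equivalence proved here is about the return value.


-- ===== PORT A =====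
-- the inner `while j < len(times_ms) and times_ms[j] <= t + 10: j += 1`
def pvWhileA (l : List Int) (bound : Int) (j : Nat) : Nat :=
  if h : j < l.length ∧ l.getD j 0 ≤ bound then pvWhileA l bound (j + 1)
  else j
termination_by l.length - j
decreasing_by omega

def max_per_10ms_bucket (times_ms : List Int) : Int :=
  if times_ms = [] then 0
  else
    let ts := PySem.List.sorted times_ms (fun x => x)
    let r := (PySem.List.enumerate ts).foldl
      (fun (st : Int × Nat) p =>
        let j := pvWhileA ts (p.2 + 10) st.2
        (max st.1 ((j : Int) - p.1), j)) (0, 0)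
    r.1

-- ===== PORT B =====
def max_per_10ms_bucket_alt (times_ms : List Int) : Int :=
  let ts := PySem.List.sorted times_ms (fun x => x)
  (PySem.List.enumerate ts).foldl
    (fun best p => max best ((PySem.List.bisectRight ts (p.2 + 10) : Int) - p.1)) 0

-- ===== PRECONDITION & SPEC =====
def Spec_max_per_10ms_bucket (times_ms : List Int) (out : Int) : Prop := out = max_per_10ms_bucket_alt times_ms
instance (times_ms : List Int) (out : Int) : Decidable (Spec_max_per_10ms_bucket times_ms out) := by unfold Spec_max_per_10ms_bucket; infer_instance

-- ===== CLAIM (what is proved, stated in full; the proofs are below) =====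
def Claim_equal_max_per_10ms_bucket : Prop := ∀ (times_ms : List Int), Dom_max_per_10ms_bucket times_ms → Spec_max_per_10ms_bucket times_ms (max_per_10ms_bucket times_ms)

-- ===== LEMMAS AND PROOFS =====

-- bisectRight is monotone in the bound on a sorted list
theorem pvUbMono (L : List Int) (hs : L.Pairwise (· ≤ ·)) (x y : Int) (hxy : x ≤ y) :
    PySem.List.bisectRight L x ≤ PySem.List.bisectRight L y := by
  obtain ⟨hxl, hxb, hxa⟩ := PySem.List.bisectRight_spec L x hs
  obtain ⟨hyl, hyb, hya⟩ := PySem.List.bisectRight_spec L y hs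
  by_contra hlt
  rw [Nat.not_le] at hlt
  have hj : PySem.List.bisectRight L y < L.length := lt_of_lt_of_le hlt hxl
  have h1 := hxb _ hj hlt
  have h2 := hya _ hj (le_refl _)
  omega

-- the while loop lands exactly on bisectRight, from any start point at or before it
theorem pvWhileA_eq (L : List Int) (hs : L.Pairwise (· ≤ ·)) (bound : Int) :
    ∀ (n j : Nat), L.length - j ≤ n → j ≤ PySem.List.bisectRight L bound →
      pvWhileA L bound j = PySem.List.bisectRight L bound := by
  obtain ⟨hl, hb, ha⟩ := PySem.List.bisectRight_spec L bound hs
  intro n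
  induction n with
  | zero =>
    intro j hn hj
    rw [pvWhileA]
    have : ¬ (j < L.length ∧ L.getD j 0 ≤ bound) := by
      rintro ⟨h1, _⟩; omega
    simp only [this, dite_false]
    omega
  | succ m ih =>
    intro j hn hj
    rw [pvWhileA]
    by_cases hcase : j < PySem.List.bisectRight L bound
    · have hjl : j < L.length := lt_of_lt_of_le hcase hl
      have hle : L.getD j 0 ≤ bound := by
        have := hb j hjl hcase
        rwa [List.getD_eq_getElem L 0 hjl]
      simp only [hjl, hle, and_self, dite_true]
      exact ih (j + 1) (by omega) (by omega)
    · have hjeq : j = PySem.List.bisectRight L bound := by omega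
      have : ¬ (j < L.length ∧ L.getD j 0 ≤ bound) := by
        rintro ⟨h1, h2⟩
        have := ha j h1 (by omega)
        rw [List.getD_eq_getElem L 0 h1] at h2
        omega
      simp only [this, dite_false]
      exact hjeq

-- enumerate preserves pairwise order on the values
theorem pvEnumPairwise (R : Int → Int → Prop) :
    ∀ (xs : List Int), xs.Pairwise R → ∀ (s : Int),
      (PySem.List.enumerate xs s).Pairwise (fun p q => R p.2 q.2) := by
  intro xs hxs
  induction hxs with
  | nil => intro s; simp [PySem.List.enumerate_nil]
  | @cons x l hx _ ih =>
    intro s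
    rw [PySem.List.enumerate_cons]
    refine List.Pairwise.cons ?_ (ih (s + 1))
    intro q hq
    obtain ⟨k, hk, rfl⟩ := (PySem.List.mem_enumerate_iff _ _ _).1 hq
    exact hx _ (List.getElem_mem hk)

-- the central invariant: A's fold with carried pointer j equals B's fold, as long as
-- j is at or before the bisect point of every remaining element's window
theorem pvFoldEq (L : List Int) (hs : L.Pairwise (· ≤ ·)) :
    ∀ (s : List (Int × Int)) (best : Int) (j : Nat),
      s.Pairwise (fun p q => p.2 ≤ q.2) →
      (∀ p ∈ s, j ≤ PySem.List.bisectRight L (p.2 + 10)) →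
      (s.foldl (fun (st : Int × Nat) p =>
          let j' := pvWhileA L (p.2 + 10) st.2
          (max st.1 ((j' : Int) - p.1), j')) (best, j)).1
        = s.foldl (fun best p =>
            max best ((PySem.List.bisectRight L (p.2 + 10) : Int) - p.1)) best := by
  intro s
  induction s with
  | nil => intro best j _ _; rfl
  | cons p rest ih =>
    intro best j hpw hinv
    have hj : j ≤ PySem.List.bisectRight L (p.2 + 10) := hinv p (List.mem_cons_self ..)
    have hw : pvWhileA L (p.2 + 10) j = PySem.List.bisectRight L (p.2 + 10) :=
      pvWhileA_eq L hs (p.2 + 10) (L.length - j) j (le_refl _) hj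
    simp only [List.foldl_cons, hw]
    exact ih _ _ hpw.of_cons (fun q hq =>
      pvUbMono L hs (p.2 + 10) (q.2 + 10)
        (by have := (List.pairwise_cons.1 hpw).1 q hq; omega))

-- ===== VERDICT (by name: the statement is the Claim_ definition above) =====
theorem max_per_10ms_bucket_spec : Claim_equal_max_per_10ms_bucket := by
  intro times_ms _
  unfold Spec_max_per_10ms_bucket max_per_10ms_bucket max_per_10ms_bucket_alt
  by_cases hnil : times_ms = []
  · subst hnil; rfl
  · simp only [hnil, if_false]
    have hs := PySem.List.sorted_pairwise times_ms (fun x => x)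
    exact pvFoldEq _ hs _ 0 0 (pvEnumPairwise _ _ hs 0) (fun _ _ => Nat.zero_le _)
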